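-- pv_equiv track=rewrite | github.com/perftool-incubator/toolbox | python/toolbox/system_cpu_topology.py | formatted_cpu_list
-- ===== SOURCE A (Python) =====
-- import copy
--
-- def formatted_cpu_list(cpu_list):
--     """
--     Convert a list of CPU IDs into a formatted string containing individual CPU IDs and/or CPU ID ranges.
--
--     Parameters:
--     cpu_list (list[int]): A list of CPU IDs to be converted into a formatted string.
--
--     Returns:
--     str: A string containing individual CPU IDs and/or CPU ID ranges.
--     """
--
--     formatted_list = []
--
--     # copy the list so that we can modify it (sort, remove)
--     tmp_list = copy.deepcopy(cpu_list)
--     tmp_list.sort()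
--
--     # process the list until it is empty
--     while len(tmp_list) > 0:
--         build_range = 0
--         range_end = 0
--
--         # if the list only has 1 element then handle it
--         if len(tmp_list) < 2:
--             formatted_list.append(str(tmp_list.pop(0)))
--         else:
--             # search for a sequential range of values using a look
--             # back technique -- meaning we start at the second
--             # element and see if it is sequetial to the prior
--             # element (initially index 0) and continue from there
--             # until the range ends
--             for index in range(1, len(tmp_list)):
--                 # compare current and previous index to see if
--                 # they are sequential values
--                 if tmp_list[index] == (tmp_list[index - 1] + 1):
--                     # current values are sequential, continue building range
--
--                     build_range = 1
--                     range_end = index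
--                 else:
--                     # current values are not sequential, stop building range
--
--                     build_range = 0
--                     range_end = index - 1
--
--                 # check to see if the range building should
--                 # continue -- this requires that there be more
--                 # elements to check
--                 if build_range == 1 and index < (len(tmp_list) - 1):
--                     continue
--                 else:
--                     # range building is stopped
--
--                     if range_end >= 1:
--                         # add the newly built range
--                         range_str = "%s-%s" % (tmp_list[0], tmp_list[range_end])
--                         formatted_list.append(range_str)
--
--                         # remove the processed values from the list
--                         for idx in range(0, range_end+1):
--                             tmp_list.pop(0)
--                     else:
--                         # no range was found, add a single value
--                         # and remove it from the list
--                         formatted_list.append(str(tmp_list.pop(0)))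
--
--                     # exit the range building loop and start over
--                     break
--
--     return(formatted_list)
-- ===== SOURCE B (Python) =====
-- def formatted_cpu_list(cpu_list):
--     out = []
--     start = prev = None
--     for x in sorted(cpu_list):
--         if prev is None:
--             start = prev = x
--         elif x == prev + 1:
--             prev = x
--         else:
--             out.append(str(start) if start == prev else "%s-%s" % (start, prev))
--             start = prev = x
--     if prev is not None:
--         out.append(str(start) if start == prev else "%s-%s" % (start, prev))
--     return out
-- ===== Notes on version B (the rewrite author's own statement) =====
-- stated objective: faster
-- what changed: Replaces A's repeated inner rescans with front pops by a single sort followed by one linear fold that groups consecutive +1 runs in state (start, prev).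
import Mathlib
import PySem

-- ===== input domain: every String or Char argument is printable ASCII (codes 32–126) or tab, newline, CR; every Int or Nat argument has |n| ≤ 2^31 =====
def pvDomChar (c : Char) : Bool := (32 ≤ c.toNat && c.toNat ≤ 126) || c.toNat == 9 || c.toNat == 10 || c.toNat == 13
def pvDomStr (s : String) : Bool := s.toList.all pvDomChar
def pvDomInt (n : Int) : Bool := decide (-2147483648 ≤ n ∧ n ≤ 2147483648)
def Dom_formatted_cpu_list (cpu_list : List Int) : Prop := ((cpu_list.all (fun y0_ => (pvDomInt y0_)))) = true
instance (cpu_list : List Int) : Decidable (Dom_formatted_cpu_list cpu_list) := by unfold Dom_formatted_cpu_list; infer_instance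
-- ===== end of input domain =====

-- B replaces A's quadratic rescan-and-pop loop by one linear fold over the sorted list (objective: faster).

-- ===== PORT A =====
-- inner 'for index in range(1, len(tmp_list))' loop; returns python's (build_range, range_end)
-- at the break. Indexing tmp[index] is exact: the loop keeps 1 ≤ index < tmp.length, so getD's
-- default is never used.
def innerStep (tmp : List Int) (index : Nat) : Nat × Nat :=
  if tmp.getD index 0 = tmp.getD (index - 1) 0 + 1 then (1, index) else (0, index - 1)

def innerA (tmp : List Int) (index : Nat) : Nat × Nat :=
  if h : (innerStep tmp index).1 = 1 ∧ index < tmp.length - 1 then innerA tmp (index + 1)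
  else innerStep tmp index
termination_by tmp.length - index
decreasing_by omega

-- outer 'while len(tmp_list) > 0' loop, accumulating formatted_list
def outerA (tmp : List Int) (acc : List String) : List String :=
  if h : 0 < tmp.length then
    if tmp.length < 2 then
      outerA tmp.tail (acc ++ [PySem.Int.toStr (tmp.headD 0)])
    else
      let re := (innerA tmp 1).2
      if 1 ≤ re then
        outerA (tmp.drop (re + 1))
          (acc ++ [PySem.Int.toStr (tmp.headD 0) ++ "-" ++ PySem.Int.toStr (tmp.getD re 0)])
      else
        outerA tmp.tail (acc ++ [PySem.Int.toStr (tmp.headD 0)])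
  else acc
termination_by tmp.length
decreasing_by
  all_goals simp only [List.length_tail, List.length_drop]; omega

def formatted_cpu_list (cpu_list : List Int) : List String :=
  outerA (PySem.List.sorted cpu_list (fun x => x)) []

-- ===== PORT B =====
def fmtEntry (s p : Int) : String :=
  if s = p then PySem.Int.toStr s else PySem.Int.toStr s ++ "-" ++ PySem.Int.toStr p

-- one step of Source B's for-loop; state = (out, Option (start, prev))
def stepB (st : List String × Option (Int × Int)) (x : Int) : List String × Option (Int × Int) :=
  match st.2 with
  | none => (st.1, some (x, x))
  | some (s, p) =>
    if x = p + 1 then (st.1, some (s, x))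
    else (st.1 ++ [fmtEntry s p], some (x, x))

def formatted_cpu_list_alt (cpu_list : List Int) : List String :=
  let st := (PySem.List.sorted cpu_list (fun x => x)).foldl stepB ([], none)
  match st.2 with
  | none => st.1
  | some (s, p) => st.1 ++ [fmtEntry s p]

-- ===== PRECONDITION & SPEC =====
def Spec_formatted_cpu_list (cpu_list : List Int) (out : List String) : Prop := out = formatted_cpu_list_alt cpu_list
instance (cpu_list : List Int) (out : List String) : Decidable (Spec_formatted_cpu_list cpu_list out) := by unfold Spec_formatted_cpu_list; infer_instance

-- ===== CLAIM (what is proved, stated in full; the proofs are below) =====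
def Claim_equal_formatted_cpu_list : Prop := ∀ (cpu_list : List Int), Dom_formatted_cpu_list cpu_list → Spec_formatted_cpu_list cpu_list (formatted_cpu_list cpu_list)

-- ===== LEMMAS AND PROOFS =====

-- index of the last element of the maximal consecutive (+1) run starting at j
def runEnd (tmp : List Int) (j : Nat) : Nat :=
  if h : j + 1 < tmp.length then
    if tmp.getD (j + 1) 0 = tmp.getD j 0 + 1 then runEnd tmp (j + 1) else j
  else j
termination_by tmp.length - j

-- the output of B from state (start=s, prev=p) on the remaining input xs
def specRun (s p : Int) (xs : List Int) : List String :=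
  match xs with
  | [] => [fmtEntry s p]
  | x :: r => if x = p + 1 then specRun s x r else fmtEntry s p :: specRun x x r

def specA : List Int → List String
  | [] => []
  | x :: xs => specRun x x xs

theorem foldB_char (xs : List Int) : ∀ (acc : List String) (s p : Int),
    (match (xs.foldl stepB (acc, some (s, p))).2 with
     | none => (xs.foldl stepB (acc, some (s, p))).1
     | some (a, b) => (xs.foldl stepB (acc, some (s, p))).1 ++ [fmtEntry a b])
      = acc ++ specRun s p xs := by
  induction xs with
  | nil => intro acc s p; simp [specRun]
  | cons x r ih =>
    intro acc s p
    by_cases hx : x = p + 1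
    · simp [List.foldl_cons, stepB, hx, specRun, ih]
    · simp [List.foldl_cons, stepB, hx, specRun, ih]

theorem alt_eq_specA (l : List Int) :
    formatted_cpu_list_alt l = specA (PySem.List.sorted l (fun x => x)) := by
  unfold formatted_cpu_list_alt
  cases h : PySem.List.sorted l (fun x => x) with
  | nil => simp [specA]
  | cons x xs =>
    simp only [List.foldl_cons, stepB, specA]
    simpa using foldB_char xs [] x x

theorem runEnd_ge (tmp : List Int) (j : Nat) : j ≤ runEnd tmp j := by
  unfold runEnd
  split
  · split
    · exact le_trans (Nat.le_succ j) (runEnd_ge tmp (j + 1))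
    · exact le_rfl
  · exact le_rfl
termination_by tmp.length - j

theorem runEnd_lt (tmp : List Int) (j : Nat) (hj : j < tmp.length) :
    runEnd tmp j < tmp.length := by
  unfold runEnd
  split
  · split
    · exact runEnd_lt tmp (j + 1) (by omega)
    · exact hj
  · exact hj
termination_by tmp.length - j

theorem runEnd_val (tmp : List Int) (j : Nat) :
    tmp.getD (runEnd tmp j) 0 = tmp.getD j 0 + ((runEnd tmp j : Int) - (j : Int)) := by
  unfold runEnd
  split
  · split
    · rename_i hlen hseq
      have ih := runEnd_val tmp (j + 1)
      rw [ih, hseq]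
      push_cast
      ring
    · simp
  · simp
termination_by tmp.length - j

-- innerA's range_end equals runEnd, for every reachable call (1 ≤ index < len, 2 ≤ len)
theorem innerA_eq_runEnd (tmp : List Int) (index : Nat)
    (h1 : 1 ≤ index) (h2 : index < tmp.length) (h3 : 2 ≤ tmp.length) :
    (innerA tmp index).2 = runEnd tmp (index - 1) := by
  have hidx : index - 1 + 1 = index := by omega
  by_cases hseq : tmp.getD index 0 = tmp.getD (index - 1) 0 + 1
  · have hp : innerStep tmp index = (1, index) := if_pos hseq
    have hrhs : runEnd tmp (index - 1) = runEnd tmp index := by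
      rw [runEnd]; rw [hidx, dif_pos h2, if_pos hseq]
    by_cases hlt : index < tmp.length - 1
    · rw [innerA, hp, dif_pos ⟨rfl, hlt⟩, hrhs]
      exact innerA_eq_runEnd tmp (index + 1) (by omega) (by omega) h3
    · rw [innerA, hp, dif_neg (fun hc => hlt hc.2), hrhs]
      rw [runEnd, dif_neg (show ¬ (index + 1 < tmp.length) by omega)]
  · have hp : innerStep tmp index = (0, index - 1) := if_neg hseq
    rw [innerA, hp, dif_neg (fun hc => by simp at hc)]
    rw [runEnd]; rw [hidx, dif_pos h2, if_neg hseq]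
termination_by tmp.length - index

-- specRun from position i (prev = tmp[i]) ends the current group at runEnd tmp i
theorem specRun_drop (tmp : List Int) (i : Nat) (s : Int) (hi : i < tmp.length) :
    specRun s (tmp.getD i 0) (tmp.drop (i + 1))
      = fmtEntry s (tmp.getD (runEnd tmp i) 0) :: specA (tmp.drop (runEnd tmp i + 1)) := by
  by_cases hlen : i + 1 < tmp.length
  · have hdrop : tmp.drop (i + 1) = tmp.getD (i + 1) 0 :: tmp.drop (i + 2) := by
      rw [List.drop_eq_getElem_cons hlen, List.getD_eq_getElem tmp 0 hlen]
    by_cases hseq : tmp.getD (i + 1) 0 = tmp.getD i 0 + 1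
    · rw [runEnd, dif_pos hlen, if_pos hseq]
      rw [hdrop]
      show (if tmp.getD (i + 1) 0 = tmp.getD i 0 + 1
              then specRun s (tmp.getD (i + 1) 0) (tmp.drop (i + 2))
              else fmtEntry s (tmp.getD i 0) ::
                specRun (tmp.getD (i + 1) 0) (tmp.getD (i + 1) 0) (tmp.drop (i + 2))) = _
      rw [if_pos hseq]
      exact specRun_drop tmp (i + 1) s hlen
    · rw [runEnd, dif_pos hlen, if_neg hseq]
      rw [hdrop]
      show (if tmp.getD (i + 1) 0 = tmp.getD i 0 + 1
              then specRun s (tmp.getD (i + 1) 0) (tmp.drop (i + 2))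
              else fmtEntry s (tmp.getD i 0) ::
                specRun (tmp.getD (i + 1) 0) (tmp.getD (i + 1) 0) (tmp.drop (i + 2))) = _
      rw [if_neg hseq]
      rfl
  · have hdrop : tmp.drop (i + 1) = [] := List.drop_eq_nil_of_le (by omega)
    rw [runEnd, dif_neg hlen, hdrop]
    rfl
termination_by tmp.length - i

-- each outer iteration of A peels exactly one group of specA
theorem outerA_eq (tmp : List Int) : ∀ (acc : List String),
    outerA tmp acc = acc ++ specA tmp := by
  intro acc
  match tmp with
  | [] => rw [outerA]; simp [specA]
  | [x] =>
    rw [outerA, dif_pos (by simp), if_pos (by simp)]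
    rw [show ([x] : List Int).tail = ([] : List Int) from rfl, outerA_eq [] _]
    simp [specA, specRun, fmtEntry]
  | x :: y :: r =>
    have hlen2 : ¬ ((x :: y :: r).length < 2) := by simp
    have h2 : 2 ≤ (x :: y :: r).length := by simp
    have hre : (innerA (x :: y :: r) 1).2 = runEnd (x :: y :: r) 0 := by
      simpa using innerA_eq_runEnd (x :: y :: r) 1 le_rfl (by simp) h2
    have hrun := specRun_drop (x :: y :: r) 0 x (by simp)
    rw [outerA, dif_pos (by simp), if_neg hlen2, hre]
    by_cases hj1 : 1 ≤ runEnd (x :: y :: r) 0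
    · rw [if_pos hj1, outerA_eq ((x :: y :: r).drop (runEnd (x :: y :: r) 0 + 1)) _]
      have hne : x ≠ (x :: y :: r).getD (runEnd (x :: y :: r) 0) 0 := by
        have hv := runEnd_val (x :: y :: r) 0
        rw [show (x :: y :: r).getD 0 0 = x from rfl] at hv
        intro hcon; rw [← hcon] at hv; omega
      have hsp : specA (x :: y :: r)
          = fmtEntry x ((x :: y :: r).getD (runEnd (x :: y :: r) 0) 0)
              :: specA ((x :: y :: r).drop (runEnd (x :: y :: r) 0 + 1)) := hrun
      rw [hsp, fmtEntry, if_neg hne]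
      simp
    · rw [if_neg hj1]
      rw [show (x :: y :: r).tail = y :: r from rfl, outerA_eq (y :: r) _]
      have hj0 : runEnd (x :: y :: r) 0 = 0 := by
        have := runEnd_ge (x :: y :: r) 0; omega
      have hsp : specA (x :: y :: r) = fmtEntry x x :: specA (y :: r) := by
        have h' := hrun; rw [hj0] at h'; exact h'
      rw [hsp, fmtEntry, if_pos rfl]
      simp
termination_by tmp.length
decreasing_by
  · simp
  · have := runEnd_lt (x :: y :: r) 0 (by simp)
    rw [List.length_drop]; omega
  · simp

-- ===== VERDICT (by name: the statement is the Claim_ definition above) =====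
theorem formatted_cpu_list_spec : Claim_equal_formatted_cpu_list := by
  intro l _
  unfold Spec_formatted_cpu_list formatted_cpu_list
  rw [outerA_eq, alt_eq_specA]
  simp
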